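-- pv_equiv track=rewrite | github.com/Ponmurugaiya/broadbandcare-grpo | env/reward.py | resolution_is_correct
-- ===== SOURCE A (Python) =====
-- from typing import Dict, List
--
-- def resolution_is_correct(solution_path: List[str], called_tools: List[str]) -> bool:
--     """Resolution is correct if required tools occurred in-order before resolve."""
--     required = [t for t in solution_path if t != "resolve_ticket"]
--     idx = 0
--     for t in called_tools:
--         if t == "resolve_ticket":
--             break
--         if idx < len(required) and t == required[idx]:
--             idx += 1
--     return idx == len(required)
-- ===== SOURCE B (Python) =====
-- from typing import Dict, List
--
-- def resolution_is_correct(solution_path: List[str], called_tools: List[str]) -> bool: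
--     """Resolution is correct if required tools occurred in-order before resolve."""
--     if "resolve_ticket" in called_tools:
--         prefix = called_tools[:called_tools.index("resolve_ticket")]
--     else:
--         prefix = called_tools
--     # occurrence index: tool -> increasing list of positions in prefix
--     pos = {}
--     for i, t in enumerate(prefix):
--         pos.setdefault(t, []).append(i)
--     # per-tool cursor into its occurrence list (each list is consumed at most once)
--     ptr = {}
--     cur = -1
--     for t in solution_path:
--         if t == "resolve_ticket":
--             continue
--         lst = pos.get(t, [])
--         j = ptr.get(t, 0)
--         while j < len(lst) and lst[j] <= cur:
--             j += 1
--         if j == len(lst):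
--             return False
--         cur = lst[j]
--         ptr[t] = j + 1
--     return True
-- ===== Notes on version B (the rewrite author's own statement) =====
-- stated objective: alternative
-- what changed: Instead of A's single left-to-right pointer scan of called_tools, B builds an occurrence-index dictionary (tool -> increasing positions before the first resolve_ticket) plus a per-tool cursor dictionary, and matches each required tool by advancing its own cursor to its first occurrence after the previously matched position.
import Mathlib
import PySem

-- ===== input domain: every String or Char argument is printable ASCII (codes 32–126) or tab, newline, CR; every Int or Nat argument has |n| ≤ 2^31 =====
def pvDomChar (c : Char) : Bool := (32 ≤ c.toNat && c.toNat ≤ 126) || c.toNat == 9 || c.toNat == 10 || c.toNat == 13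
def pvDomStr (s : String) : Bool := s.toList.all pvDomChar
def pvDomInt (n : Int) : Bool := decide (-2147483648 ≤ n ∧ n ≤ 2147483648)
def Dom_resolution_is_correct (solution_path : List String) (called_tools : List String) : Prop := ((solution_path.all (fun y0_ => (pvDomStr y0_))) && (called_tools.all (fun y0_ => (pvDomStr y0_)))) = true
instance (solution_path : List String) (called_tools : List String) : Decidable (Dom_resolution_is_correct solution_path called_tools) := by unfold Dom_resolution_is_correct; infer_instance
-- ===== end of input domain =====

-- B replaces A's single pointer scan by an occurrence-index dictionary (tool -> increasing
-- positions before the first "resolve_ticket") with a per-tool cursor; same cost, different structure.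

-- ===== PORT A =====
-- A's for-loop with the index pointer `idx` and the break on "resolve_ticket".
def pvAloop (required : List String) : List String → Nat → Nat
  | [], idx => idx
  | t :: ts, idx =>
    if t = "resolve_ticket" then idx
    else if idx < required.length ∧ required[idx]? = some t then pvAloop required ts (idx + 1)
    else pvAloop required ts idx

def resolution_is_correct (solution_path : List String) (called_tools : List String) : Bool :=
  pvAloop (solution_path.filter (fun t => t ≠ "resolve_ticket")) called_tools 0
    == (solution_path.filter (fun t => t ≠ "resolve_ticket")).length

-- ===== PORT B =====
-- prefix = called_tools[:called_tools.index("resolve_ticket")] if present, else called_tools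
def pvPrefixB (called_tools : List String) : List String :=
  if "resolve_ticket" ∈ called_tools then
    match PySem.List.index? called_tools "resolve_ticket" with
    | some i => PySem.List.slice called_tools none (some (i : Int))
    | none => called_tools
  else called_tools

-- for i, t in enumerate(prefix): pos.setdefault(t, []).append(i)
def pvBuild (pfx : List String) : PySem.Dict String (List Int) :=
  (PySem.List.enumerate pfx).foldl
    (fun d it => d.insert it.2 ((d.getD it.2 []) ++ [it.1])) PySem.Dict.empty

-- while j < len(lst) and lst[j] <= cur: j += 1
def pvAdvance (cur : Int) (lst : List Int) (j : Nat) : Nat :=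
  if h : j < lst.length then
    if lst[j] ≤ cur then pvAdvance cur lst (j + 1) else j
  else j
termination_by lst.length - j

-- main loop over solution_path: cur = last matched position, ptr = per-tool cursor
-- (lst.getD j 0 is Python's lst[j]: exact here since it is only reached with j < len(lst))
def pvBloop (pos : PySem.Dict String (List Int)) :
    List String → Int → PySem.Dict String Nat → Bool
  | [], _, _ => true
  | t :: ts, cur, ptr =>
    if t = "resolve_ticket" then pvBloop pos ts cur ptr
    else
      let lst := pos.getD t []
      let j := pvAdvance cur lst (ptr.getD t 0)
      if j = lst.length then false
      else pvBloop pos ts (lst.getD j 0) (ptr.insert t (j + 1))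

def resolution_is_correct_alt (solution_path : List String) (called_tools : List String) : Bool :=
  pvBloop (pvBuild (pvPrefixB called_tools)) solution_path (-1) PySem.Dict.empty

-- ===== PRECONDITION & SPEC =====
def Spec_resolution_is_correct (solution_path : List String) (called_tools : List String) (out : Bool) : Prop := out = resolution_is_correct_alt solution_path called_tools
instance (solution_path : List String) (called_tools : List String) (out : Bool) : Decidable (Spec_resolution_is_correct solution_path called_tools out) := by unfold Spec_resolution_is_correct; infer_instance

-- ===== CLAIM (what is proved, stated in full; the proofs are below) =====
def Claim_equal_resolution_is_correct : Prop := ∀ (solution_path : List String) (called_tools : List String), Dom_resolution_is_correct solution_path called_tools → Spec_resolution_is_correct solution_path called_tools (resolution_is_correct solution_path called_tools)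

-- ===== LEMMAS AND PROOFS =====

-- Proof-side: first occurrence-list entry greater than cur, and the cursor-free loop.
def pvFirstGt (cur : Int) : List Int → Option Int
  | [] => none
  | i :: is => if i > cur then some i else pvFirstGt cur is

def pvBspec (pos : PySem.Dict String (List Int)) : List String → Int → Bool
  | [], _ => true
  | t :: ts, cur =>
    if t = "resolve_ticket" then pvBspec pos ts cur
    else
      match pvFirstGt cur (pos.getD t []) with
      | none => false
      | some i => pvBspec pos ts i

-- Proof-side spec: greedy leftmost subsequence matching (skipping "resolve_ticket" in the pattern).
def pvConsume (v : String) : List String → Option (List String)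
  | [] => none
  | x :: xs => if x = v then some xs else pvConsume v xs

def pvAllInIter : List String → List String → Bool
  | [], _ => true
  | r :: rs, xs =>
    if r = "resolve_ticket" then pvAllInIter rs xs
    else
      match pvConsume r xs with
      | some rest => pvAllInIter rs rest
      | none => false

-- occurrence positions of t in p, offset by base, in increasing order
def pvOcc (t : String) : List String → Int → List Int
  | [], _ => []
  | x :: xs, base => (if x = t then [base] else []) ++ pvOcc t xs (base + 1)

-- first index of t in q
def pvIdx (t : String) : List String → Option Nat
  | [] => none
  | x :: xs => if x = t then some 0 else (pvIdx t xs).map (· + 1)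

-- A's break makes the loop see only the prefix before the first "resolve_ticket".
theorem pvAloop_takeWhile (req : List String) (cs : List String) (idx : Nat) :
    pvAloop req cs idx = pvAloop req (cs.takeWhile (fun x => x ≠ "resolve_ticket")) idx := by
  induction cs generalizing idx with
  | nil => rfl
  | cons t ts ih =>
    by_cases h : t = "resolve_ticket"
    · subst h; simp [pvAloop]
    · rw [List.takeWhile_cons, if_pos (by simp [h])]
      simp only [pvAloop, if_neg h]
      split_ifs <;> exact ih _

-- B's prefix is exactly that takeWhile.
theorem pvPrefixB_eq (cs : List String) :
    pvPrefixB cs = cs.takeWhile (fun x => x ≠ "resolve_ticket") := by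
  induction cs with
  | nil => rfl
  | cons x xs ih =>
    by_cases hx : x = "resolve_ticket"
    · subst hx
      rw [pvPrefixB, if_pos (List.mem_cons_self ..), PySem.List.index?_cons_self,
        List.takeWhile_cons, if_neg (by simp)]
      show PySem.List.slice _ none (some ((0 : Nat) : Int)) = []
      rw [PySem.List.slice_to_natCast]
      rfl
    · rw [List.takeWhile_cons, if_pos (by simp [hx])]
      by_cases hm : "resolve_ticket" ∈ xs
      · have hmem : "resolve_ticket" ∈ x :: xs := List.mem_cons_of_mem _ hm
        obtain ⟨i, hi⟩ := Option.isSome_iff_exists.mp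
          ((PySem.List.index?_isSome_iff _ _).mpr hm)
        rw [pvPrefixB, if_pos hmem, PySem.List.index?_cons_of_ne _ hx, hi]
        simp only [Option.map_some]
        rw [PySem.List.slice_to_natCast, List.take_succ_cons]
        congr 1
        rw [← ih, pvPrefixB, if_pos hm, hi]
        show List.take i xs = PySem.List.slice xs none (some ((i : Nat) : Int))
        rw [PySem.List.slice_to_natCast]
      · have hmem : "resolve_ticket" ∉ x :: xs := by
          intro hc
          rcases List.mem_cons.mp hc with hc | hc
          · exact hx hc.symm
          · exact hm hc
        rw [pvPrefixB, if_neg hmem, ← ih, pvPrefixB, if_neg hm]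

-- A-side invariant: A's pointer reaches the end of `required` iff greedy matching succeeds.
theorem pvMainA (xs : List String) (req : List String) (idx : Nat)
    (hle : idx ≤ req.length) (hnb : ∀ x ∈ xs, x ≠ "resolve_ticket")
    (hreq : ∀ r ∈ req, r ≠ "resolve_ticket") :
    (pvAloop req xs idx = req.length) ↔ pvAllInIter (req.drop idx) xs = true := by
  induction xs generalizing idx with
  | nil =>
    simp only [pvAloop]
    rcases Nat.lt_or_ge idx req.length with hlt | hge
    · have hdrop : req.drop idx = req[idx] :: req.drop (idx + 1) := (List.getElem_cons_drop hlt).symm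
      have hri : req[idx] ≠ "resolve_ticket" := hreq _ (List.getElem_mem hlt)
      rw [hdrop]
      simp [pvAllInIter, pvConsume, Nat.ne_of_lt hlt, hri]
    · have heq : idx = req.length := Nat.le_antisymm hle hge
      have hdrop : req.drop idx = [] := by rw [heq]; simp
      rw [hdrop]
      simp [pvAllInIter, heq]
  | cons x xs ih =>
    have hx : x ≠ "resolve_ticket" := hnb x (List.mem_cons_self ..)
    have hnb' : ∀ y ∈ xs, y ≠ "resolve_ticket" := fun y hy => hnb y (List.mem_cons_of_mem _ hy)
    simp only [pvAloop, hx, if_false]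
    rcases Nat.lt_or_ge idx req.length with hlt | hge
    · have hdrop : req.drop idx = req[idx] :: req.drop (idx + 1) := (List.getElem_cons_drop hlt).symm
      have hri : req[idx] ≠ "resolve_ticket" := hreq _ (List.getElem_mem hlt)
      by_cases hxe : x = req[idx]
      · have hcond : idx < req.length ∧ req[idx]? = some x := ⟨hlt, by simp [List.getElem?_eq_getElem hlt, hxe]⟩
        rw [if_pos hcond, hdrop]
        simp only [pvAllInIter, pvConsume, hxe, if_pos, if_neg hri]
        exact ih (idx + 1) hlt hnb'
      · have hcond : ¬ (idx < req.length ∧ req[idx]? = some x) := by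
          rintro ⟨-, h2⟩
          rw [List.getElem?_eq_getElem hlt] at h2
          exact hxe (Option.some.inj h2).symm
        rw [if_neg hcond, hdrop]
        have hskip : pvAllInIter (req[idx] :: req.drop (idx + 1)) (x :: xs)
            = pvAllInIter (req[idx] :: req.drop (idx + 1)) xs := by
          simp [pvAllInIter, pvConsume, hri, fun h => hxe h]
        rw [hskip, ← hdrop]
        exact ih idx hle hnb'
    · have heq : idx = req.length := Nat.le_antisymm hle hge
      have hcond : ¬ (idx < req.length ∧ req[idx]? = some x) := by
        rintro ⟨h1, -⟩; omega
      have hdrop : req.drop idx = [] := by rw [heq]; simp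
      rw [if_neg hcond, hdrop]
      simp only [pvAllInIter]
      have := ih idx hle hnb'
      rw [hdrop] at this
      simpa [pvAllInIter] using this

-- Dict build: getD of the fold equals accumulated occurrence lists.
theorem pvBuild_getD (t : String) (p : List String) (base : Int)
    (d : PySem.Dict String (List Int)) :
    ((PySem.List.enumerate p base).foldl
      (fun d it => d.insert it.2 ((d.getD it.2 []) ++ [it.1])) d).getD t []
      = d.getD t [] ++ pvOcc t p base := by
  induction p generalizing base d with
  | nil => simp [PySem.List.enumerate_nil, pvOcc]
  | cons x xs ih =>
    rw [PySem.List.enumerate_cons, List.foldl_cons, ih]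
    simp only [pvOcc]
    by_cases hx : x = t
    · subst hx
      rw [PySem.Dict.getD_insert, if_pos rfl]
      simp
    · rw [PySem.Dict.getD_insert, if_neg (fun h => hx h.symm)]
      simp [hx]

-- pvFirstGt below base: first element
theorem pvFirstGt_lt (t : String) (p : List String) (base c : Int) (h : c < base) :
    pvFirstGt c (pvOcc t p base) = (pvIdx t p).map (fun k => base + k) := by
  induction p generalizing base with
  | nil => simp [pvOcc, pvIdx, pvFirstGt]
  | cons x xs ih =>
    by_cases hx : x = t
    · simp [pvOcc, pvIdx, pvFirstGt, hx, h]
    · simp only [pvOcc, pvIdx, if_neg hx, List.nil_append]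
      rw [ih (base + 1) (by omega)]
      cases pvIdx t xs <;> simp
      omega

-- pvConsume via pvIdx
theorem pvConsume_eq (t : String) (p : List String) :
    pvConsume t p = (pvIdx t p).map (fun k => p.drop (k + 1)) := by
  induction p with
  | nil => simp [pvConsume, pvIdx]
  | cons x xs ih =>
    by_cases hx : x = t
    · simp [pvConsume, pvIdx, hx]
    · simp only [pvConsume, pvIdx, if_neg hx, ih]
      cases pvIdx t xs <;> simp

-- skipping positions ≤ c
theorem pvFirstGt_drop (t : String) (p : List String) (n : Nat) (base c : Int)
    (h : c + 1 = base + n) :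
    pvFirstGt c (pvOcc t p base) = pvFirstGt c (pvOcc t (p.drop n) (base + n)) := by
  induction n generalizing p base with
  | zero => simp
  | succ n ih =>
    cases p with
    | nil => simp [pvOcc]
    | cons x xs =>
      have hbc : ¬ (base > c) := by push_cast at h; omega
      have hstep : pvFirstGt c (pvOcc t (x :: xs) base) = pvFirstGt c (pvOcc t xs (base + 1)) := by
        by_cases hx : x = t
        · simp [pvOcc, pvFirstGt, hx, hbc]
        · simp [pvOcc, hx]
      rw [hstep, List.drop_succ_cons, ih xs (base + 1) (by push_cast at h ⊢; omega)]
      congr 2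
      push_cast
      ring

-- pvAdvance: bounds and characterisation of the stopping index.
theorem pvAdvance_props (cur : Int) (lst : List Int) (j : Nat) (hj : j ≤ lst.length) :
    j ≤ pvAdvance cur lst j ∧ pvAdvance cur lst j ≤ lst.length ∧
    (∀ i, j ≤ i → i < pvAdvance cur lst j → ∀ (hl : i < lst.length), lst[i] ≤ cur) ∧
    (∀ h : pvAdvance cur lst j < lst.length, cur < lst[pvAdvance cur lst j]) := by
  revert hj
  fun_induction pvAdvance cur lst j with
  | case1 j h hle ih =>
    intro hj
    obtain ⟨i1, i2, i3, i4⟩ := ih h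
    refine ⟨by omega, i2, ?_, i4⟩
    intro i hji hir hl
    rcases Nat.eq_or_lt_of_le hji with heq | hlt
    · subst heq; exact hle
    · exact i3 i hlt hir hl
  | case2 j h hgt =>
    intro hj
    exact ⟨le_refl _, Nat.le_of_lt h, fun i h1 h2 _ => absurd h2 (by omega), fun _ => by omega⟩
  | case3 j h =>
    intro hj
    exact ⟨le_refl _, hj, fun i h1 h2 _ => absurd h2 (by omega), fun hlt => absurd hlt h⟩

-- pvFirstGt picks the first index whose entry exceeds cur.
theorem pvFirstGt_eq (lst : List Int) (cur : Int) (r : Nat) (hr : r ≤ lst.length)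
    (hmid : ∀ i, (hi : i < r) → ∀ (hl : i < lst.length), lst[i] ≤ cur)
    (hstop : ∀ h : r < lst.length, cur < lst[r]) :
    pvFirstGt cur lst = if h : r < lst.length then some lst[r] else none := by
  induction lst generalizing r with
  | nil =>
    have : r = 0 := by simpa using hr
    subst this
    simp [pvFirstGt]
  | cons x xs ih =>
    cases r with
    | zero =>
      have hx : cur < x := hstop (by simp)
      simp [pvFirstGt, hx]
    | succ r' =>
      have hx : x ≤ cur := hmid 0 (Nat.succ_pos _) (by simp)
      have hnx : ¬ (x > cur) := by omega
      simp only [pvFirstGt, if_neg hnx]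
      rw [ih r' (by simpa using hr)
        (fun i hi hl => by simpa using hmid (i + 1) (by omega) (by simpa using hl))
        (fun h => by simpa using hstop (by simpa using h))]
      simp only [List.length_cons]
      by_cases h2 : r' < xs.length
      · rw [dif_pos h2, dif_pos (by omega)]
        simp
      · rw [dif_neg h2, dif_neg (by omega)]

-- The cursor-carrying loop computes the cursor-free one, under the cursor invariant.
theorem pvBloop_eq_pvBspec (pos : PySem.Dict String (List Int)) (rs : List String)
    (cur : Int) (ptr : PySem.Dict String Nat)
    (hinv : ∀ t, ptr.getD t 0 ≤ (pos.getD t []).length ∧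
      ∀ i, (hi : i < ptr.getD t 0) → ∀ (hl : i < (pos.getD t []).length),
        (pos.getD t [])[i] ≤ cur) :
    pvBloop pos rs cur ptr = pvBspec pos rs cur := by
  induction rs generalizing cur ptr with
  | nil => rfl
  | cons t ts ih =>
    by_cases ht : t = "resolve_ticket"
    · simp only [pvBloop, pvBspec, if_pos ht]
      exact ih cur ptr hinv
    · simp only [pvBloop, pvBspec, if_neg ht]
      obtain ⟨hlen, htake⟩ := hinv t
      obtain ⟨a1, a2, a3, a4⟩ := pvAdvance_props cur (pos.getD t []) (ptr.getD t 0) hlen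
      have hfg := pvFirstGt_eq (pos.getD t []) cur (pvAdvance cur (pos.getD t []) (ptr.getD t 0)) a2
        (fun i hi hl => by
          rcases Nat.lt_or_ge i (ptr.getD t 0) with h' | h'
          · exact htake i h' hl
          · exact a3 i h' hi hl)
        a4
      by_cases hj : pvAdvance cur (pos.getD t []) (ptr.getD t 0) = (pos.getD t []).length
      · rw [if_pos hj, hfg, dif_neg (by omega)]
      · have hjl : pvAdvance cur (pos.getD t []) (ptr.getD t 0) < (pos.getD t []).length := by omega
        rw [if_neg hj, hfg, dif_pos hjl]
        have hget : (pos.getD t []).getD (pvAdvance cur (pos.getD t []) (ptr.getD t 0)) 0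
            = (pos.getD t [])[pvAdvance cur (pos.getD t []) (ptr.getD t 0)] := by
          rw [List.getD_eq_getElem _ _ hjl]
        rw [hget]
        apply ih
        intro t'
        by_cases ht' : t' = t
        · subst ht'
          rw [PySem.Dict.getD_insert, if_pos rfl]
          refine ⟨by omega, ?_⟩
          intro i hi hl
          rcases Nat.lt_or_ge i (pvAdvance cur (pos.getD t' []) (ptr.getD t' 0)) with h' | h'
          · rcases Nat.lt_or_ge i (ptr.getD t' 0) with h'' | h''
            · exact le_trans (htake i h'' hl) (le_of_lt (a4 hjl))
            · exact le_trans (a3 i h'' h' hl) (le_of_lt (a4 hjl))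
          · have : i = pvAdvance cur (pos.getD t' []) (ptr.getD t' 0) := by omega
            subst this
            exact le_refl _
        · rw [PySem.Dict.getD_insert, if_neg ht']
          obtain ⟨b1, b2⟩ := hinv t'
          exact ⟨b1, fun i hi hl => le_trans (b2 i hi hl) (le_of_lt (a4 hjl))⟩

-- B-side invariant.
theorem pvMainB (P : List String) (rs : List String) (c : Int) (hc : -1 ≤ c) :
    pvBspec (pvBuild P) rs c = pvAllInIter rs (P.drop (c + 1).toNat) := by
  induction rs generalizing c with
  | nil => rfl
  | cons t ts ih =>
    by_cases ht : t = "resolve_ticket"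
    · simp only [pvBspec, pvAllInIter, if_pos ht]
      exact ih c hc
    · have hg : (pvBuild P).getD t [] = pvOcc t P 0 := by
        have h0 := pvBuild_getD t P 0 PySem.Dict.empty
        simpa [pvBuild] using h0
      have hm : (((c + 1).toNat : ℕ) : Int) = c + 1 := Int.toNat_of_nonneg (by omega)
      have h1 : pvFirstGt c (pvOcc t P 0)
          = (pvIdx t (P.drop (c + 1).toNat)).map (fun k => (0 + ((c + 1).toNat : Int)) + k) := by
        rw [pvFirstGt_drop t P (c + 1).toNat 0 c (by omega), pvFirstGt_lt t _ _ _ (by omega)]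
      simp only [pvBspec, if_neg ht, hg, h1, pvAllInIter, pvConsume_eq]
      cases hidx : pvIdx t (P.drop (c + 1).toNat) with
      | none => simp
      | some k =>
        show pvBspec (pvBuild P) ts (0 + ((c + 1).toNat : Int) + (k : Int)) = _
        rw [ih (0 + ((c + 1).toNat : Int) + k) (by omega)]
        congr 1
        show List.drop _ P = List.drop (k + 1) (List.drop (c + 1).toNat P)
        rw [List.drop_drop]
        congr 1
        omega

theorem pvAllInIter_filter (rs xs : List String) :
    pvAllInIter rs xs = pvAllInIter (rs.filter (fun t => t ≠ "resolve_ticket")) xs := by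
  induction rs generalizing xs with
  | nil => rfl
  | cons r rs ih =>
    by_cases hr : r = "resolve_ticket"
    · rw [List.filter_cons, if_neg (by simp [hr])]
      simp only [pvAllInIter, if_pos hr]
      exact ih xs
    · rw [List.filter_cons, if_pos (by simp [hr])]
      simp only [pvAllInIter, if_neg hr]
      cases pvConsume r xs with
      | none => rfl
      | some rest => exact ih rest

-- ===== VERDICT (by name: the statement is the Claim_ definition above) =====
theorem resolution_is_correct_spec : Claim_equal_resolution_is_correct := by
  intro sp cs _
  unfold Spec_resolution_is_correct resolution_is_correct resolution_is_correct_alt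
  rw [pvPrefixB_eq, pvAloop_takeWhile,
    pvBloop_eq_pvBspec _ _ _ _ (by intro t; simp [PySem.Dict.getD]),
    pvMainB _ _ _ (by norm_num)]
  have hnb : ∀ x ∈ cs.takeWhile (fun x => x ≠ "resolve_ticket"), x ≠ "resolve_ticket" := by
    intro x hx; simpa using List.mem_takeWhile_imp hx
  have hreq : ∀ r ∈ sp.filter (fun t => t ≠ "resolve_ticket"), r ≠ "resolve_ticket" := by
    intro r hr; simpa using (List.mem_filter.mp hr).2
  have h := pvMainA (cs.takeWhile (fun x => x ≠ "resolve_ticket"))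
    (sp.filter (fun t => t ≠ "resolve_ticket")) 0 (Nat.zero_le _) hnb hreq
  simp only [List.drop_zero] at h
  rw [show ((-1 : Int) + 1).toNat = 0 from rfl, List.drop_zero, pvAllInIter_filter]
  cases hB : pvAllInIter (sp.filter (fun t => t ≠ "resolve_ticket"))
      (cs.takeWhile (fun x => x ≠ "resolve_ticket")) with
  | true => rw [h.mpr hB]; simp
  | false =>
    rw [beq_eq_false_iff_ne]
    intro hc
    rw [h.mp hc] at hB
    exact Bool.noConfusion hB
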